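-- pv_equiv track=rewrite | github.com/FGG100y/lc-brain-gym | src/2024E-HWOD/递归_boss的收入/script.py | find_boss_and_calculate_income
-- ===== SOURCE A (Python) =====
-- from collections import defaultdict
--
-- def find_boss_and_calculate_income(relationships):
--     # 初始化分销商收入表和分销商下级的字典
--     income_map = {}
--     subordinates = defaultdict(list)
--     all_distributors = set()  # 所有分销商集合
--     has_superior = set()       # 有上级的分销商集合
--
--     # 构建分销商关系树
--     for dist_id, parent_id, income in relationships:
--         income_map[dist_id] = income
--         all_distributors.add(dist_id)
--         if parent_id != -1:  # 如果有上级分销商（-1 表示没有上级）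
--             subordinates[parent_id].append(dist_id)
--             has_superior.add(dist_id)
--
--     # 出现在 parent_id 但不在 dist_id 的就是 boss
--     # 找到没有上级的分销商，就是boss
--     boss_candidates = set(subordinates.keys()) - all_distributors
--
--     if len(boss_candidates) != 1:
--         raise ValueError(f"输入数据不合法，{boss_candidates=}。")
--     boss = boss_candidates.pop()
--
--     # 递归计算总收入
--     def compute_total_income(distributor):
--         total_income = income_map.get(distributor, 0)
--         # 计算下级分销商贡献的收入
--         for sub in subordinates[distributor]:
--             sub_income = compute_total_income(sub)
--             total_income += sub_income // 100 * 15
--         return total_income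
--
--     # 计算上交金额
--     def compute_boss_income(distributor):
--         #  total_income = 0  # boss只抽成
--         total_income = income_map.get(distributor, 0)
--         # 计算下级上交的金额
--         for sub in subordinates[distributor]:
--             sub_income = compute_total_income(sub)
--             total_income += sub_income
--         return total_income // 100 * 15
--
--     # 计算boss收入
--     boss_income = compute_boss_income(boss)
--
--     return boss, boss_income
-- ===== SOURCE B (Python) =====
-- def find_boss_and_calculate_income(relationships):
--     # Build income table, parent pointers and children lists in one pass.
--     income_map = {}
--     parent = {}
--     children = {}
--     for dist_id, parent_id, income in relationships:
--         income_map[dist_id] = income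
--         if parent_id != -1:
--             parent[dist_id] = parent_id
--             children.setdefault(parent_id, []).append(dist_id)
--
--     bosses = set(children) - set(income_map)
--     if len(bosses) != 1:
--         raise ValueError(f"输入数据不合法，boss_candidates={bosses}。")
--     boss = bosses.pop()
--
--     n = len(relationships)
--
--     # Depth of a node = number of parent steps to a root; the walk is cut
--     # off after n+1 steps, so nodes on a parent cycle (never reachable
--     # from the boss) get the cap n+1, deeper than any acyclic node.
--     def depth(x):
--         d = 0
--         while x in parent and d <= n:
--             x = parent[x]
--             d += 1
--         return d
--
--     # Fill a memo table bottom-up: deepest nodes first, so every child's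
--     # total is ready when its acyclic parent is processed.  Nodes on a
--     # cycle share the capped depth; their (never used) entries read
--     # missing children as 0.
--     total = {}
--     for x in sorted(income_map, key=depth, reverse=True):
--         total[x] = income_map[x] + sum(total.get(c, 0) // 100 * 15
--                                        for c in children.get(x, []))
--
--     return boss, sum(total[c] for c in children.get(boss, [])) // 100 * 15
-- ===== Notes on version B (the rewrite author's own statement) =====
-- stated objective: alternative
-- what changed: The two recursive helpers are replaced by an iterative bottom-up pass: B records parent pointers, computes each node's depth by a parent-chasing walk cut off after n+1 steps, sorts the distributors deepest-first and fills a memo table total[node] so every child's total is ready when its acyclic parent is processed; no recursion is used.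
import Mathlib
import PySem

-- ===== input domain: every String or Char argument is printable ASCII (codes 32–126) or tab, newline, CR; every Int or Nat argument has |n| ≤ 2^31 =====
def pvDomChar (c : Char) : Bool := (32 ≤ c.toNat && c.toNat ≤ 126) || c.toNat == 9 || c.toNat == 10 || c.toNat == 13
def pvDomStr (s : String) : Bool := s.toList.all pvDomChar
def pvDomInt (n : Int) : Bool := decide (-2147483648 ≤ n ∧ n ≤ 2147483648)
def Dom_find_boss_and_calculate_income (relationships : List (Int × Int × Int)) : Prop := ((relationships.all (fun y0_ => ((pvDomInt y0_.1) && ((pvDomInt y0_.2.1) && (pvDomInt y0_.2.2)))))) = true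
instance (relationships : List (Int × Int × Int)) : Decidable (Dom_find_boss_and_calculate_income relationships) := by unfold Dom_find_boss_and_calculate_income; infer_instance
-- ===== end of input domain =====

-- B replaces A's recursive income helpers by an iterative deepest-first memo-table pass (objective: alternative decomposition, same cost class).

-- ===== PORT A =====
-- compute_total_income: Python's unbounded recursion, ported with fuel; under Pre_ (one boss
-- candidate, one parent per id) the recursion depth is < relationships.length, so the fuel
-- 'relationships.length' given at the call site is never exhausted.
def pvComputeTotal (incomeMap : PySem.Dict Int Int) (subs : PySem.Dict Int (List Int)) :
    Nat → Int → Int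
  | 0, _ => 0
  | f + 1, x =>
      (subs.getD x []).foldl
        (fun acc c => acc + PySem.Int.floordiv (pvComputeTotal incomeMap subs f c) 100 * 15)
        (incomeMap.getD x 0)

def find_boss_and_calculate_income (relationships : List (Int × Int × Int)) : Int × Int :=
  -- one loop building income_map, subordinates (defaultdict append = modify with default []),
  -- all_distributors and has_superior (built but never read, as in the Python)
  let st := relationships.foldl
    (fun (st : PySem.Dict Int Int × PySem.Dict Int (List Int) × PySem.Set Int × PySem.Set Int) r =>
      let im := st.1.insert r.1 r.2.2
      let allD := PySem.Set.add st.2.2.1 r.1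
      if r.2.1 ≠ -1 then
        (im, st.2.1.modify r.2.1 [] (· ++ [r.1]), allD, PySem.Set.add st.2.2.2 r.1)
      else
        (im, st.2.1, allD, st.2.2.2))
    (PySem.Dict.empty, PySem.Dict.empty, PySem.Set.empty, PySem.Set.empty)
  let incomeMap := st.1
  let subs := st.2.1
  let allDist := st.2.2.1
  let bossCands := PySem.Set.diff (PySem.Set.ofList subs.keys) allDist
  -- len(boss_candidates) != 1 raises ValueError (excluded by Pre_); pop() of the singleton
  let boss := bossCands.headD 0
  let bossIncome := PySem.Int.floordiv
    ((subs.getD boss []).foldl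
      (fun acc c => acc + pvComputeTotal incomeMap subs relationships.length c)
      (incomeMap.getD boss 0)) 100 * 15
  (boss, bossIncome)

-- ===== PORT B =====
-- depth(x): Source B's while-loop chasing parent pointers; its guard 'd <= n' allows exactly
-- n+1 iterations, so the loop is this structural recursion on the n+1 remaining iterations.
def pvDepthGo (parent : PySem.Dict Int Int) : Nat → Int → Int → Int
  | 0, _, d => d
  | f + 1, x, d =>
      match parent.get? x with
      | some p => pvDepthGo parent f p (d + 1)
      | none => d

def find_boss_and_calculate_income_alt (relationships : List (Int × Int × Int)) : Int × Int :=
  -- one loop building income_map, parent and children (setdefault(p, []).append(d) = modify)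
  let st := relationships.foldl
    (fun (st : PySem.Dict Int Int × PySem.Dict Int Int × PySem.Dict Int (List Int)) r =>
      let im := st.1.insert r.1 r.2.2
      if r.2.1 ≠ -1 then
        (im, st.2.1.insert r.1 r.2.1, st.2.2.modify r.2.1 [] (· ++ [r.1]))
      else
        (im, st.2.1, st.2.2))
    (PySem.Dict.empty, PySem.Dict.empty, PySem.Dict.empty)
  let incomeMap := st.1
  let parent := st.2.1
  let children := st.2.2
  let bosses := PySem.Set.diff (PySem.Set.ofList children.keys) (PySem.Set.ofList incomeMap.keys)
  -- len(bosses) != 1 raises ValueError (excluded by Pre_); pop() of the singleton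
  let boss := bosses.headD 0
  let order := PySem.List.sorted incomeMap.keys (fun x => pvDepthGo parent (relationships.length + 1) x 0) true
  -- income_map[x]: x is a key, so getD is exact; total.get(c, 0) is getD
  let total := order.foldl
    (fun t x =>
      t.insert x (incomeMap.getD x 0 +
        (children.getD x []).foldl
          (fun s c => s + PySem.Int.floordiv (t.getD c 0) 100 * 15) 0))
    PySem.Dict.empty
  -- total[c]: every child of the boss is an income_map key, so getD is exact
  (boss, PySem.Int.floordiv
    ((children.getD boss []).foldl (fun s c => s + total.getD c 0) 0) 100 * 15)

-- ===== PRECONDITION & SPEC =====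
def pvDs (rows : List (Int × Int × Int)) : List Int := rows.map (·.1)

def pvCands (rows : List (Int × Int × Int)) : List Int :=
  (PySem.List.dedup ((rows.filter (fun r => r.2.1 ≠ -1)).map (·.2.1))).filter
    (fun p => !(pvDs rows).contains p)

-- Pre_ excludes inputs without exactly one boss candidate (A raises ValueError there) and
-- inputs that give one distributor id two different parent ids (duplicate keys: the tree is
-- ill-formed and A's per-edge recursion and B's last-parent-wins table are equally defensible
-- readings of such data).
def Pre_find_boss_and_calculate_income (relationships : List (Int × Int × Int)) : Prop :=
  (pvCands relationships).length = 1 ∧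
  (∀ r ∈ relationships, ∀ r' ∈ relationships, r.1 = r'.1 → r.2.1 = r'.2.1)

instance (relationships : List (Int × Int × Int)) :
    Decidable (Pre_find_boss_and_calculate_income relationships) := by
  unfold Pre_find_boss_and_calculate_income; infer_instance

def pvWitness_find_boss_and_calculate_income : (List (Int × Int × Int)) :=
  [(1, 2, 100), (3, 1, 250)]

def Spec_find_boss_and_calculate_income (relationships : List (Int × Int × Int)) (out : Int × Int) : Prop := out = find_boss_and_calculate_income_alt relationships
instance (relationships : List (Int × Int × Int)) (out : Int × Int) : Decidable (Spec_find_boss_and_calculate_income relationships out) := by unfold Spec_find_boss_and_calculate_income; infer_instance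

-- ===== CLAIM (what is proved, stated in full; the proofs are below) =====
def Claim_equal_find_boss_and_calculate_income : Prop := ∀ (relationships : List (Int × Int × Int)), Dom_find_boss_and_calculate_income relationships → Pre_find_boss_and_calculate_income relationships → Spec_find_boss_and_calculate_income relationships (find_boss_and_calculate_income relationships)

-- ===== LEMMAS AND PROOFS =====

-- proof-side views of the structures both build loops produce
def pvIncome (rows : List (Int × Int × Int)) : PySem.Dict Int Int :=
  rows.foldl (fun d r => d.insert r.1 r.2.2) PySem.Dict.empty

def pvParent (rows : List (Int × Int × Int)) : PySem.Dict Int Int :=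
  rows.foldl (fun d r => if r.2.1 ≠ -1 then d.insert r.1 r.2.1 else d) PySem.Dict.empty

def pvChildren (rows : List (Int × Int × Int)) : PySem.Dict Int (List Int) :=
  rows.foldl (fun d r => if r.2.1 ≠ -1 then d.modify r.2.1 [] (· ++ [r.1]) else d) PySem.Dict.empty

-- the value A's compute_total_income(x) returns (fuel n+1 always suffices for halting chains)
def pvVal (rows : List (Int × Int × Int)) (x : Int) : Int :=
  pvComputeTotal (pvIncome rows) (pvChildren rows) (rows.length + 1) x

-- B's depth key
def pvDepth (rows : List (Int × Int × Int)) (x : Int) : Int :=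
  pvDepthGo (pvParent rows) (rows.length + 1) x 0

def pvStep (rows : List (Int × Int × Int)) (x : Int) : Option Int :=
  match rows.find? (fun r => r.1 == x) with
  | some r => if r.2.1 = -1 then none else some r.2.1
  | none => none

def pvIter (rows : List (Int × Int × Int)) : Nat → Int → Option Int
  | 0, x => some x
  | k + 1, x =>
      match pvStep rows x with
      | some p => pvIter rows k p
      | none => none

-- "the parent walk from x halts after exactly j steps"
def pvStops (rows : List (Int × Int × Int)) (j : Nat) (x : Int) : Prop :=
  ∃ y, pvIter rows j x = some y ∧ pvStep rows y = none

def pvStepA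
    (st : PySem.Dict Int Int × PySem.Dict Int (List Int) × PySem.Set Int × PySem.Set Int)
    (r : Int × Int × Int) :
    PySem.Dict Int Int × PySem.Dict Int (List Int) × PySem.Set Int × PySem.Set Int :=
  (st.1.insert r.1 r.2.2,
   if r.2.1 ≠ -1 then st.2.1.modify r.2.1 [] (· ++ [r.1]) else st.2.1,
   PySem.Set.add st.2.2.1 r.1,
   if r.2.1 ≠ -1 then PySem.Set.add st.2.2.2 r.1 else st.2.2.2)

def pvStepB
    (st : PySem.Dict Int Int × PySem.Dict Int Int × PySem.Dict Int (List Int))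
    (r : Int × Int × Int) :
    PySem.Dict Int Int × PySem.Dict Int Int × PySem.Dict Int (List Int) :=
  (st.1.insert r.1 r.2.2,
   if r.2.1 ≠ -1 then st.2.1.insert r.1 r.2.1 else st.2.1,
   if r.2.1 ≠ -1 then st.2.2.modify r.2.1 [] (· ++ [r.1]) else st.2.2)

theorem pv_stepA_eq :
    (fun (st : PySem.Dict Int Int × PySem.Dict Int (List Int) × PySem.Set Int × PySem.Set Int)
         (r : Int × Int × Int) =>
      let im := st.1.insert r.1 r.2.2
      let allD := PySem.Set.add st.2.2.1 r.1
      if r.2.1 ≠ -1 then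
        (im, st.2.1.modify r.2.1 [] (· ++ [r.1]), allD, PySem.Set.add st.2.2.2 r.1)
      else (im, st.2.1, allD, st.2.2.2)) = pvStepA := by
  funext st r
  by_cases hr : r.2.1 = -1 <;> simp [pvStepA, hr]

theorem pv_stepB_eq :
    (fun (st : PySem.Dict Int Int × PySem.Dict Int Int × PySem.Dict Int (List Int))
         (r : Int × Int × Int) =>
      let im := st.1.insert r.1 r.2.2
      if r.2.1 ≠ -1 then
        (im, st.2.1.insert r.1 r.2.1, st.2.2.modify r.2.1 [] (· ++ [r.1]))
      else (im, st.2.1, st.2.2)) = pvStepB := by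
  funext st r
  by_cases hr : r.2.1 = -1 <;> simp [pvStepB, hr]

theorem pv_foldA_proj (rows : List (Int × Int × Int))
    (a : PySem.Dict Int Int) (b : PySem.Dict Int (List Int)) (c d : PySem.Set Int) :
    rows.foldl pvStepA (a, b, c, d) =
    (rows.foldl (fun d' r => d'.insert r.1 r.2.2) a,
     rows.foldl (fun d' r => if r.2.1 ≠ -1 then d'.modify r.2.1 [] (· ++ [r.1]) else d') b,
     rows.foldl (fun s r => PySem.Set.add s r.1) c,
     rows.foldl (fun s r => if r.2.1 ≠ -1 then PySem.Set.add s r.1 else s) d) := by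
  induction rows generalizing a b c d with
  | nil => rfl
  | cons r t ih => exact ih _ _ _ _

theorem pv_foldB_proj (rows : List (Int × Int × Int))
    (a : PySem.Dict Int Int) (b : PySem.Dict Int Int) (c : PySem.Dict Int (List Int)) :
    rows.foldl pvStepB (a, b, c) =
    (rows.foldl (fun d' r => d'.insert r.1 r.2.2) a,
     rows.foldl (fun d' r => if r.2.1 ≠ -1 then d'.insert r.1 r.2.1 else d') b,
     rows.foldl (fun d' r => if r.2.1 ≠ -1 then d'.modify r.2.1 [] (· ++ [r.1]) else d') c) := by
  induction rows generalizing a b c with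
  | nil => rfl
  | cons r t ih => exact ih _ _ _

theorem pv_income_keys (rows : List (Int × Int × Int)) :
    (pvIncome rows).keys = PySem.Set.ofList (pvDs rows) := by
  unfold pvIncome pvDs
  rw [PySem.Dict.keys_foldl_insert_key rows (fun r => r.1) (fun _ r => r.2.2)]
  simp only [PySem.Dict.keys_empty, PySem.Set.update_nil_left]

theorem pv_all_eq (rows : List (Int × Int × Int)) :
    rows.foldl (fun s r => PySem.Set.add s r.1) PySem.Set.empty =
      PySem.Set.ofList (pvDs rows) := by
  rw [← PySem.Set.update_map_eq_foldl_add rows (fun r => r.1) PySem.Set.empty]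
  show PySem.Set.update [] _ = _
  rw [PySem.Set.update_nil_left]
  rfl

theorem pv_children_eq_pairs (rows : List (Int × Int × Int)) :
    pvChildren rows =
      ((rows.filter (fun r => r.2.1 ≠ -1)).map (fun r => (r.2.1, r.1))).foldl
        (fun d p => d.modify p.1 [] (· ++ [p.2])) PySem.Dict.empty := by
  rw [List.foldl_map, List.foldl_filter]
  unfold pvChildren
  apply PySem.List.foldl_congr_mem
  intro acc r _
  by_cases hr : r.2.1 = -1 <;> simp [hr]

theorem pv_children_getD (rows : List (Int × Int × Int)) (x : Int) :
    (pvChildren rows).getD x [] =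
      ((rows.filter (fun r => r.2.1 ≠ -1)).filter (fun r => r.2.1 == x)).map (·.1) := by
  rw [pv_children_eq_pairs, PySem.Dict.getD_foldl_modify_append]
  rw [List.filter_map, List.map_map]
  simp [Function.comp_def]

theorem pv_children_keys (rows : List (Int × Int × Int)) :
    (pvChildren rows).keys =
      PySem.Set.ofList ((rows.filter (fun r => r.2.1 ≠ -1)).map (·.2.1)) := by
  rw [pv_children_eq_pairs]
  rw [PySem.Dict.keys_foldl_modify_key]
  simp [List.map_map, Function.comp_def, PySem.Set.update_nil_left]

theorem pv_cands_eq (rows : List (Int × Int × Int)) :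
    PySem.Set.diff (PySem.Set.ofList (pvChildren rows).keys) (PySem.Set.ofList (pvDs rows)) =
      pvCands rows := by
  rw [pv_children_keys]
  unfold pvCands PySem.Set.diff
  rw [PySem.Set.ofList_ofList, PySem.List.dedup_eq_ofList]
  apply List.filter_congr
  intro p _
  simp [PySem.Set.contains_eq_listContains, PySem.Set.mem_ofList]

theorem pv_step_of_mem (rows : List (Int × Int × Int))
    (hfun : ∀ r ∈ rows, ∀ r' ∈ rows, r.1 = r'.1 → r.2.1 = r'.2.1)
    {c x i : Int} (h : (c, x, i) ∈ rows) (hx : x ≠ -1) : pvStep rows c = some x := by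
  unfold pvStep
  cases hf : rows.find? (fun r => r.1 == c) with
  | none =>
      rw [List.find?_eq_none] at hf
      exact absurd (by simp : (((c, x, i) : Int × Int × Int).1 == c) = true) (hf _ h)
  | some r =>
      have hr : r ∈ rows := List.mem_of_find?_eq_some hf
      have hrc : r.1 = c := by simpa using List.find?_some hf
      have hpar : r.2.1 = x := hfun r hr (c, x, i) h (by simpa using hrc)
      show (if r.2.1 = -1 then none else some r.2.1) = some x
      rw [hpar]
      simp [hx]

theorem pv_step_mem_ds (rows : List (Int × Int × Int)) {c x : Int}
    (h : pvStep rows c = some x) : c ∈ pvDs rows := by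
  unfold pvStep at h
  cases hf : rows.find? (fun r => r.1 == c) with
  | none => rw [hf] at h; exact absurd h (by simp)
  | some r =>
      have hr : r ∈ rows := List.mem_of_find?_eq_some hf
      have hrc : r.1 = c := by simpa using List.find?_some hf
      exact hrc ▸ List.mem_map_of_mem hr

theorem pv_step_none_of_not_ds (rows : List (Int × Int × Int)) {x : Int}
    (h : x ∉ pvDs rows) : pvStep rows x = none := by
  unfold pvStep
  cases hf : rows.find? (fun r => r.1 == x) with
  | none => rfl
  | some r =>
      exfalso
      have hr : r ∈ rows := List.mem_of_find?_eq_some hf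
      have hrc : r.1 = x := by simpa using List.find?_some hf
      exact h (hrc ▸ List.mem_map_of_mem hr)

theorem pv_child_iff (rows : List (Int × Int × Int)) (c x : Int) :
    c ∈ (pvChildren rows).getD x [] ↔ ∃ i, (c, x, i) ∈ rows ∧ x ≠ -1 := by
  rw [pv_children_getD]
  simp only [List.mem_map, List.mem_filter]
  constructor
  · rintro ⟨r, ⟨⟨hr, hne⟩, hx⟩, hc⟩
    refine ⟨r.2.2, ?_, ?_⟩
    · have : r = (c, x, r.2.2) := by
        have hx' : r.2.1 = x := by simpa using hx
        cases r with | mk a bc => cases bc with | mk b cc => simp_all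
      exact this ▸ hr
    · have hx' : r.2.1 = x := by simpa using hx
      simpa [hx'] using hne
  · rintro ⟨i, hmem, hx⟩
    exact ⟨(c, x, i), ⟨⟨hmem, by simpa using hx⟩, by simp⟩, rfl⟩

theorem pv_child_step (rows : List (Int × Int × Int))
    (hfun : ∀ r ∈ rows, ∀ r' ∈ rows, r.1 = r'.1 → r.2.1 = r'.2.1)
    {c x : Int} (h : c ∈ (pvChildren rows).getD x []) : pvStep rows c = some x := by
  obtain ⟨i, hmem, hx⟩ := (pv_child_iff rows c x).1 h
  exact pv_step_of_mem rows hfun hmem hx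

theorem pv_child_ds (rows : List (Int × Int × Int)) {c x : Int}
    (h : c ∈ (pvChildren rows).getD x []) : c ∈ pvDs rows := by
  obtain ⟨i, hmem, _⟩ := (pv_child_iff rows c x).1 h
  exact List.mem_map_of_mem hmem

theorem pvIter_add (rows : List (Int × Int × Int)) (a b : Nat) (x : Int) :
    pvIter rows (a + b) x = (pvIter rows a x).bind (fun y => pvIter rows b y) := by
  induction a generalizing x with
  | zero => simp [pvIter]
  | succ a ih =>
      rw [show a + 1 + b = (a + b) + 1 from by omega]
      cases hs : pvStep rows x with
      | none => simp [pvIter, hs]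
      | some p => simp only [pvIter, hs]; exact ih p

theorem pv_stops_succ (rows : List (Int × Int × Int)) {c x : Int} {j : Nat}
    (hs : pvStep rows c = some x) (h : pvStops rows j x) : pvStops rows (j + 1) c := by
  obtain ⟨y, hy, hyn⟩ := h
  exact ⟨y, by simpa [pvIter, hs] using hy, hyn⟩

theorem pv_stops_none_after (rows : List (Int × Int × Int)) {x : Int} {j b : Nat}
    (h : pvStops rows j x) (hb : j < b) : pvIter rows b x = none := by
  obtain ⟨y, hy, hyn⟩ := h
  have : b = j + (1 + (b - j - 1)) := by omega
  rw [this, pvIter_add, hy]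
  show pvIter rows (1 + (b - j - 1)) y = none
  rw [pvIter_add]
  simp [pvIter, hyn]

theorem pv_stops_unique (rows : List (Int × Int × Int)) {x : Int} {j k : Nat}
    (h : pvStops rows j x) (h' : pvStops rows k x) : j = k := by
  by_contra hne
  rcases Nat.lt_or_ge j k with hlt | hge
  · obtain ⟨y, hy, _⟩ := h'
    rw [pv_stops_none_after rows h hlt] at hy
    exact absurd hy (by simp)
  · have hlt : k < j := by omega
    obtain ⟨y, hy, _⟩ := h
    rw [pv_stops_none_after rows h' hlt] at hy
    exact absurd hy (by simp)

-- a halting chain visits pairwise distinct nodes, so its stopping time is at most n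
theorem pv_stops_le_aux (rows : List (Int × Int × Int)) :
    ∀ (j : Nat) (x : Int) (S : List Int),
      pvStops rows j x → S.Nodup → (∀ s ∈ S, s ∈ pvDs rows) →
      (∀ s ∈ S, ∃ k, 1 ≤ k ∧ pvIter rows k s = some x) →
      j + S.length ≤ (pvDs rows).dedup.length := by
  intro j
  induction j with
  | zero =>
      intro x S _ hS hds _
      have hsub : S.Subperm (pvDs rows).dedup :=
        List.subperm_of_subset hS (fun s hs => List.mem_dedup.2 (hds s hs))
      simpa using hsub.length_le
  | succ j ih =>
      intro x S hstop hS hds hreach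
      obtain ⟨y, hy, hyn⟩ := hstop
      cases hs : pvStep rows x with
      | none => rw [pvIter, hs] at hy; exact absurd hy (by simp)
      | some p =>
          have hstop' : pvStops rows j p := ⟨y, by simpa [pvIter, hs] using hy, hyn⟩
          have hstopx : pvStops rows (j + 1) x := ⟨y, hy, hyn⟩
          have hxds : x ∈ pvDs rows := pv_step_mem_ds rows hs
          have hx1 : pvIter rows 1 x = some p := by simp [pvIter, hs]
          have hxS : x ∉ S := by
            intro hxS
            obtain ⟨k, hk1, hk⟩ := hreach x hxS
            rcases Nat.lt_or_ge (j + 1) k with hgt | hle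
            · have : pvIter rows k x = none := pv_stops_none_after rows hstopx hgt
              rw [this] at hk
              exact absurd hk (by simp)
            · have : pvStops rows (j + 1 - k) x := by
                refine ⟨y, ?_, hyn⟩
                rw [show j + 1 = k + (j + 1 - k) from by omega, pvIter_add, hk] at hy
                simpa using hy
              have := pv_stops_unique rows hstopx this
              omega
          have := ih p (S ++ [x])
            hstop'
            (hS.append (List.nodup_singleton x) (List.disjoint_singleton.2 hxS))
            (by intro s hsm; rcases List.mem_append.1 hsm with h | h
                · exact hds s h
                · simp at h; subst h; exact hxds)
            (by intro s hsm
                rcases List.mem_append.1 hsm with h | h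
                · obtain ⟨k, hk1, hk⟩ := hreach s h
                  refine ⟨k + 1, by omega, ?_⟩
                  rw [pvIter_add, hk]
                  simpa using hx1
                · simp at h; subst h
                  exact ⟨1, le_refl 1, hx1⟩)
          simp only [List.length_append, List.length_singleton] at this
          omega

theorem pv_stops_le (rows : List (Int × Int × Int)) {j : Nat} {x : Int}
    (h : pvStops rows j x) : j ≤ rows.length := by
  have h1 := pv_stops_le_aux rows j x [] h (by simp) (by simp) (by simp)
  have h2 : (pvDs rows).dedup.length ≤ (pvDs rows).length :=
    (List.dedup_sublist _).length_le
  have h3 : (pvDs rows).length = rows.length := by simp [pvDs]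
  omega

theorem pv_parent_get?_aux (c : Int) :
    ∀ (rs : List (Int × Int × Int)) (d : PySem.Dict Int Int),
      (∀ r ∈ rs, ∀ r' ∈ rs, r.1 = r'.1 → r.2.1 = r'.2.1) →
      (rs.foldl (fun d r => if r.2.1 ≠ -1 then d.insert r.1 r.2.1 else d) d).get? c =
        (match rs.find? (fun r => r.1 == c) with
         | some r => if r.2.1 = -1 then d.get? c else some r.2.1
         | none => d.get? c) := by
  intro rs
  induction rs with
  | nil => intro d _; rfl
  | cons r t iht =>
      intro d hfun
      have hfun' : ∀ r1 ∈ t, ∀ r2 ∈ t, r1.1 = r2.1 → r1.2.1 = r2.2.1 :=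
        fun r1 h1 r2 h2 => hfun r1 (List.mem_cons_of_mem r h1) r2 (List.mem_cons_of_mem r h2)
      simp only [List.foldl_cons]
      by_cases hrc : r.1 = c
      · simp only [List.find?_cons, show (r.1 == c) = true from by simp [hrc]]
        by_cases hr0 : r.2.1 = -1
        · simp only [ne_eq, hr0, not_true_eq_false, if_neg, not_false_eq_true, if_pos]
          rw [iht d hfun']
          cases hfind : t.find? (fun r => r.1 == c) with
          | none => rfl
          | some r'' =>
              have h2 : r'' ∈ t := List.mem_of_find?_eq_some hfind
              have h2c : r''.1 = c := by simpa using List.find?_some hfind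
              have heq : r''.2.1 = r.2.1 :=
                hfun r'' (List.mem_cons_of_mem r h2) r (by simp) (h2c.trans hrc.symm)
              show (if r''.2.1 = -1 then d.get? c else some r''.2.1) = d.get? c
              rw [heq, hr0]
              simp
        · simp only [ne_eq, hr0, not_false_eq_true, if_pos, if_neg]
          rw [iht (d.insert r.1 r.2.1) hfun']
          cases hfind : t.find? (fun r => r.1 == c) with
          | none =>
              rw [PySem.Dict.get?_insert, if_pos hrc.symm]
          | some r'' =>
              have h2 : r'' ∈ t := List.mem_of_find?_eq_some hfind
              have h2c : r''.1 = c := by simpa using List.find?_some hfind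
              have heq : r''.2.1 = r.2.1 :=
                hfun r'' (List.mem_cons_of_mem r h2) r (by simp) (h2c.trans hrc.symm)
              show (if r''.2.1 = -1 then (d.insert r.1 r.2.1).get? c else some r''.2.1) =
                some r.2.1
              rw [heq]
              simp [hr0]
      · simp only [List.find?_cons, show (r.1 == c) = false from by simp [hrc]]
        by_cases hr0 : r.2.1 = -1
        · simp only [ne_eq, hr0, not_true_eq_false, if_neg, not_false_eq_true]
          exact iht d hfun'
        · simp only [ne_eq, hr0, not_false_eq_true, if_pos]
          rw [iht (d.insert r.1 r.2.1) hfun']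
          have hdc : (d.insert r.1 r.2.1).get? c = d.get? c := by
            rw [PySem.Dict.get?_insert, if_neg (fun h => hrc h.symm)]
          cases hfind : t.find? (fun r => r.1 == c) with
          | none => exact hdc
          | some r'' =>
              show (if r''.2.1 = -1 then (d.insert r.1 r.2.1).get? c else some r''.2.1) =
                (if r''.2.1 = -1 then d.get? c else some r''.2.1)
              by_cases h2 : r''.2.1 = -1 <;> simp [h2, hdc]

theorem pv_parent_get? (rows : List (Int × Int × Int))
    (hfun : ∀ r ∈ rows, ∀ r' ∈ rows, r.1 = r'.1 → r.2.1 = r'.2.1) (c : Int) :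
    (pvParent rows).get? c = pvStep rows c := by
  have h := pv_parent_get?_aux c rows PySem.Dict.empty hfun
  unfold pvParent pvStep
  rw [h]
  cases rows.find? (fun r => r.1 == c) <;> simp

theorem pv_depthGo_shift (p : PySem.Dict Int Int) :
    ∀ (f : Nat) (x d : Int), pvDepthGo p f x d = d + pvDepthGo p f x 0 := by
  intro f
  induction f with
  | zero => intro x d; simp [pvDepthGo]
  | succ f ih =>
      intro x d
      cases hp : p.get? x with
      | none => simp [pvDepthGo, hp]
      | some q =>
          simp only [pvDepthGo, hp]
          rw [ih q (d + 1), ih q (0 + 1)]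
          ring

theorem pv_depth_stops (rows : List (Int × Int × Int))
    (hfun : ∀ r ∈ rows, ∀ r' ∈ rows, r.1 = r'.1 → r.2.1 = r'.2.1) :
    ∀ (j : Nat) (x : Int) (f : Nat), pvStops rows j x → j ≤ f →
      pvDepthGo (pvParent rows) f x 0 = (j : Int) := by
  intro j
  induction j with
  | zero =>
      intro x f hstop _
      obtain ⟨y, hy, hyn⟩ := hstop
      obtain rfl : x = y := by simpa [pvIter] using hy
      have hp : (pvParent rows).get? x = none := by rw [pv_parent_get? rows hfun]; exact hyn
      cases f with
      | zero => rfl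
      | succ f => simp [pvDepthGo, hp]
  | succ j ih =>
      intro x f hstop hf
      obtain ⟨y, hy, hyn⟩ := hstop
      cases hs : pvStep rows x with
      | none => rw [show j + 1 = 1 + j from by omega, pvIter_add] at hy; simp [pvIter, hs] at hy
      | some p =>
          have hstop' : pvStops rows j p := by
            refine ⟨y, ?_, hyn⟩
            rw [show j + 1 = 1 + j from by omega, pvIter_add] at hy
            simpa [pvIter, hs] using hy
          obtain ⟨f', rfl⟩ : ∃ f', f = f' + 1 := ⟨f - 1, by omega⟩
          have hp : (pvParent rows).get? x = some p := by rw [pv_parent_get? rows hfun]; exact hs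
          simp only [pvDepthGo, hp]
          rw [pv_depthGo_shift, ih p f' hstop' (by omega)]
          push_cast; ring

theorem pv_depth_child (rows : List (Int × Int × Int))
    (hfun : ∀ r ∈ rows, ∀ r' ∈ rows, r.1 = r'.1 → r.2.1 = r'.2.1)
    {c x : Int} {j : Nat} (hstop : pvStops rows j x) (hc : pvStep rows c = some x) :
    pvDepth rows c = pvDepth rows x + 1 := by
  have hj : j ≤ rows.length := pv_stops_le rows hstop
  have hstopc : pvStops rows (j + 1) c := pv_stops_succ rows hc hstop
  unfold pvDepth
  rw [pv_depth_stops rows hfun j x (rows.length + 1) hstop (by omega),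
      pv_depth_stops rows hfun (j + 1) c (rows.length + 1) hstopc (by omega)]
  push_cast; ring

-- fuel-invariance of A's recursion on halting chains
theorem pv_FI (rows : List (Int × Int × Int))
    (hfun : ∀ r ∈ rows, ∀ r' ∈ rows, r.1 = r'.1 → r.2.1 = r'.2.1) :
    ∀ (f g : Nat) (x : Int) (j : Nat),
      pvStops rows j x →
      rows.length + 1 ≤ f + j → rows.length + 1 ≤ g + j →
      pvComputeTotal (pvIncome rows) (pvChildren rows) f x =
        pvComputeTotal (pvIncome rows) (pvChildren rows) g x := by
  intro f
  induction f using Nat.strong_induction_on with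
  | h f ihf =>
      intro g x j hstop hf hg
      have hj : j ≤ rows.length := pv_stops_le rows hstop
      obtain ⟨f', rfl⟩ : ∃ f', f = f' + 1 := ⟨f - 1, by omega⟩
      obtain ⟨g', rfl⟩ : ∃ g', g = g' + 1 := ⟨g - 1, by omega⟩
      show ((pvChildren rows).getD x []).foldl _ _ = ((pvChildren rows).getD x []).foldl _ _
      apply PySem.List.foldl_congr_mem
      intro acc c hc
      have hcs : pvStep rows c = some x := pv_child_step rows hfun hc
      have hstopc : pvStops rows (j + 1) c := pv_stops_succ rows hcs hstop
      have hjc : j + 1 ≤ rows.length := pv_stops_le rows hstopc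
      rw [ihf f' (by omega) g' c (j + 1) hstopc (by omega) (by omega)]

theorem pv_val_eq (rows : List (Int × Int × Int))
    (hfun : ∀ r ∈ rows, ∀ r' ∈ rows, r.1 = r'.1 → r.2.1 = r'.2.1)
    {x : Int} {j : Nat} (hstop : pvStops rows j x) :
    pvVal rows x =
      ((pvChildren rows).getD x []).foldl
        (fun a c => a + PySem.Int.floordiv (pvVal rows c) 100 * 15)
        ((pvIncome rows).getD x 0) := by
  show ((pvChildren rows).getD x []).foldl _ _ = _
  apply PySem.List.foldl_congr_mem
  intro acc c hc
  have hcs : pvStep rows c = some x := pv_child_step rows hfun hc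
  have hstopc : pvStops rows (j + 1) c := pv_stops_succ rows hcs hstop
  rw [pv_FI rows hfun rows.length (rows.length + 1) c (j + 1) hstopc (by omega) (by omega)]
  rfl

theorem pv_compute_eq_val (rows : List (Int × Int × Int))
    (hfun : ∀ r ∈ rows, ∀ r' ∈ rows, r.1 = r'.1 → r.2.1 = r'.2.1)
    {c : Int} {j : Nat} (hstop : pvStops rows j c) (hj1 : 1 ≤ j) :
    pvComputeTotal (pvIncome rows) (pvChildren rows) rows.length c = pvVal rows c := by
  exact pv_FI rows hfun rows.length (rows.length + 1) c j hstop (by omega) (by omega)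

theorem pv_income_getD_not_mem (rows : List (Int × Int × Int)) {c : Int}
    (h : c ∉ pvDs rows) : (pvIncome rows).getD c 0 = 0 := by
  apply PySem.Dict.getD_of_not_contains
  rw [← Bool.not_eq_true, PySem.Dict.contains_iff_mem_keys, pv_income_keys]
  simpa [PySem.Set.mem_ofList] using h

-- the memo fold gives every node with a halting chain its A-value
theorem pv_memo (rows : List (Int × Int × Int))
    (hfun : ∀ r ∈ rows, ∀ r' ∈ rows, r.1 = r'.1 → r.2.1 = r'.2.1) :
    ∀ (L : List Int) (t : PySem.Dict Int Int),
      L.Pairwise (fun a b => pvDepth rows b ≤ pvDepth rows a) →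
      (∀ c, c ∈ pvDs rows → (∃ j, pvStops rows j c) → c ∉ L → t.get? c = some (pvVal rows c)) →
      ∀ (c : Int), c ∈ pvDs rows → (∃ j, pvStops rows j c) →
        (L.foldl
          (fun t x =>
            t.insert x ((pvIncome rows).getD x 0 +
              ((pvChildren rows).getD x []).foldl
                (fun s c => s + PySem.Int.floordiv (t.getD c 0) 100 * 15) 0)) t).get? c =
          some (pvVal rows c) := by
  intro L
  induction L with
  | nil =>
      intro t _ ht c hcds hc
      exact ht c hcds hc (by simp)
  | cons y L' ih =>
      intro t hpw ht c hcds hc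
      simp only [List.foldl_cons]
      have hpwh : ∀ b ∈ L', pvDepth rows b ≤ pvDepth rows y := (List.pairwise_cons.1 hpw).1
      by_cases hy : ∃ j, pvStops rows j y
      · obtain ⟨jy, hjy⟩ := hy
        have hchild : ∀ c' ∈ (pvChildren rows).getD y [], t.getD c' 0 = pvVal rows c' := by
          intro c' hc'
          have hcs : pvStep rows c' = some y := pv_child_step rows hfun hc'
          have hstopc : pvStops rows (jy + 1) c' := pv_stops_succ rows hcs hjy
          have hdep : pvDepth rows c' = pvDepth rows y + 1 :=
            pv_depth_child rows hfun hjy hcs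
          have hc'ny : c' ≠ y := by intro he; rw [he] at hdep; omega
          have hc'nL : c' ∉ L' := by
            intro hmem
            have := hpwh c' hmem
            omega
          have := ht c' (pv_child_ds rows hc') ⟨jy + 1, hstopc⟩ (by simp [hc'ny, hc'nL])
          rw [PySem.Dict.getD_eq_get?_getD, this]
          rfl
        have hval : ((pvIncome rows).getD y 0 +
            ((pvChildren rows).getD y []).foldl
              (fun s c => s + PySem.Int.floordiv (t.getD c 0) 100 * 15) 0) = pvVal rows y := by
          rw [PySem.List.foldl_congr_mem _ _
                (fun s c => s + PySem.Int.floordiv (pvVal rows c) 100 * 15) _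
                (by intro acc c' hc'; rw [hchild c' hc'])]
          rw [pv_val_eq rows hfun hjy]
          rw [PySem.List.foldl_add, PySem.List.foldl_add]
          ring
        rw [hval]
        apply ih (t.insert y (pvVal rows y)) (List.pairwise_cons.1 hpw).2 ?_ c hcds hc
        intro c' hc'ds hc'stop hc'nL
        rw [PySem.Dict.get?_insert]
        by_cases he : c' = y
        · subst he; simp
        · rw [if_neg he]
          exact ht c' hc'ds hc'stop (by simp [he, hc'nL])
      · -- y's chain never halts: its (never used) entry does not disturb halting nodes
        apply ih _ (List.pairwise_cons.1 hpw).2 ?_ c hcds hc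
        intro c' hc'ds hc'stop hc'nL
        rw [PySem.Dict.get?_insert]
        by_cases he : c' = y
        · subst he; exact absurd hc'stop hy
        · rw [if_neg he]
          exact ht c' hc'ds hc'stop (by simp [he, hc'nL])

def pvBoss (rows : List (Int × Int × Int)) : Int :=
  (PySem.Set.diff (PySem.Set.ofList (pvChildren rows).keys)
    (PySem.Set.ofList (pvDs rows))).headD 0

def pvOrder (rows : List (Int × Int × Int)) : List Int :=
  PySem.List.sorted (PySem.Set.ofList (pvDs rows))
    (fun x => pvDepthGo (pvParent rows) (rows.length + 1) x 0) true

def pvTotal (rows : List (Int × Int × Int)) : PySem.Dict Int Int :=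
  (pvOrder rows).foldl
    (fun t x =>
      t.insert x ((pvIncome rows).getD x 0 +
        ((pvChildren rows).getD x []).foldl
          (fun s c => s + PySem.Int.floordiv (t.getD c 0) 100 * 15) 0))
    PySem.Dict.empty

theorem pv_portA_eq (rows : List (Int × Int × Int)) :
    find_boss_and_calculate_income rows =
      (pvBoss rows,
       PySem.Int.floordiv
         (((pvChildren rows).getD (pvBoss rows) []).foldl
           (fun acc c => acc + pvComputeTotal (pvIncome rows) (pvChildren rows) rows.length c)
           ((pvIncome rows).getD (pvBoss rows) 0)) 100 * 15) := by
  unfold find_boss_and_calculate_income pvBoss pvIncome pvChildren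
  rw [pv_stepA_eq]
  simp only [pv_foldA_proj, pv_all_eq]

theorem pv_portB_eq (rows : List (Int × Int × Int)) :
    find_boss_and_calculate_income_alt rows =
      (pvBoss rows,
       PySem.Int.floordiv
         (((pvChildren rows).getD (pvBoss rows) []).foldl
            (fun s c => s + (pvTotal rows).getD c 0) 0) 100 * 15) := by
  unfold find_boss_and_calculate_income_alt
  rw [pv_stepB_eq]
  simp only [pv_foldB_proj]
  rw [show (List.foldl (fun (d' : PySem.Dict Int Int) r => d'.insert r.1 r.2.2)
        PySem.Dict.empty rows) = pvIncome rows from rfl]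
  rw [pv_income_keys, PySem.Set.ofList_ofList]
  rfl

-- ===== VERDICT (by name: the statement is the Claim_ definition above) =====
theorem find_boss_and_calculate_income_spec : Claim_equal_find_boss_and_calculate_income := by
  intro rows _ hpre
  obtain ⟨hc1, hfun⟩ := hpre
  unfold Spec_find_boss_and_calculate_income
  rw [pv_portA_eq, pv_portB_eq]
  obtain ⟨b, hb⟩ := List.length_eq_one_iff.1 hc1
  have hboss : pvBoss rows = b := by
    unfold pvBoss
    rw [pv_cands_eq, hb]
    rfl
  have hbmem : b ∈ pvCands rows := by rw [hb]; simp
  have hbnds : b ∉ pvDs rows := by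
    unfold pvCands at hbmem
    have h2 := (List.mem_filter.1 hbmem).2
    simp only [Bool.not_eq_true'] at h2
    intro hmem
    rw [List.contains_eq_mem] at h2
    simp [hmem] at h2
  rw [hboss]
  have hbstep : pvStep rows b = none := pv_step_none_of_not_ds rows hbnds
  have hmemo : ∀ (c : Int), c ∈ pvDs rows → (∃ j, pvStops rows j c) →
      (pvTotal rows).get? c = some (pvVal rows c) := by
    intro c hcds hc
    unfold pvTotal
    refine pv_memo rows hfun (pvOrder rows) PySem.Dict.empty ?_ ?_ c hcds hc
    · exact PySem.List.sorted_pairwise_rev _ _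
    · intro c' hc'ds _ hc'no
      exfalso
      apply hc'no
      unfold pvOrder
      rw [PySem.List.mem_sorted, PySem.Set.mem_ofList]
      exact hc'ds
  have hterm : ∀ c ∈ (pvChildren rows).getD b [],
      (pvTotal rows).getD c 0 =
        pvComputeTotal (pvIncome rows) (pvChildren rows) rows.length c := by
    intro c hc
    have hcs : pvStep rows c = some b := pv_child_step rows hfun hc
    have hcds : c ∈ pvDs rows := pv_child_ds rows hc
    have hstopc : pvStops rows 1 c := ⟨b, by simp [pvIter, hcs], hbstep⟩
    rw [PySem.Dict.getD_eq_get?_getD, hmemo c hcds ⟨1, hstopc⟩,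
        pv_compute_eq_val rows hfun hstopc (le_refl 1)]
    rfl
  have hsum :
      ((pvChildren rows).getD b []).foldl
        (fun acc c => acc + pvComputeTotal (pvIncome rows) (pvChildren rows) rows.length c)
        ((pvIncome rows).getD b 0) =
      ((pvChildren rows).getD b []).foldl (fun s c => s + (pvTotal rows).getD c 0) 0 := by
    rw [pv_income_getD_not_mem rows hbnds]
    apply PySem.List.foldl_congr_mem
    intro acc c hc
    rw [hterm c hc]
  rw [hsum]
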